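-- pv_equiv track=rewrite | github.com/luka261/GOAhomework | day30/classwork/codewars.py | Manual_replace
-- ===== SOURCE A (Python) =====
-- def Manual_replace(text, old, new):
--   result = ""
--   i = 0
--   while i < len(text):
--     if text[i:i + len(old)] == old:
--       result += new
--       i += len(old)
--     else:
--       result += text[i]
--       i += 1
--   return result
-- ===== SOURCE B (Python) =====
-- def Manual_replace(text, old, new):
--     return new.join(text.split(old))
-- ===== Notes on version B (the rewrite author's own statement) =====
-- stated objective: simpler
-- what changed: Replaces the character-by-character index walk with a split-then-join: str.split finds the non-overlapping occurrence boundaries and the segments are joined with the replacement; Pre_ excludes old == '', where A loops forever on nonempty text (returning only the degenerate text == '' case) while B's split raises ValueError.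
-- outside the precondition, e.g. on Manual_replace('', '', 'x'): A returns '', B raises ValueError; on Manual_replace('ab', '', 'x'): A does not finish within the time limit, B raises ValueError
import Mathlib
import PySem

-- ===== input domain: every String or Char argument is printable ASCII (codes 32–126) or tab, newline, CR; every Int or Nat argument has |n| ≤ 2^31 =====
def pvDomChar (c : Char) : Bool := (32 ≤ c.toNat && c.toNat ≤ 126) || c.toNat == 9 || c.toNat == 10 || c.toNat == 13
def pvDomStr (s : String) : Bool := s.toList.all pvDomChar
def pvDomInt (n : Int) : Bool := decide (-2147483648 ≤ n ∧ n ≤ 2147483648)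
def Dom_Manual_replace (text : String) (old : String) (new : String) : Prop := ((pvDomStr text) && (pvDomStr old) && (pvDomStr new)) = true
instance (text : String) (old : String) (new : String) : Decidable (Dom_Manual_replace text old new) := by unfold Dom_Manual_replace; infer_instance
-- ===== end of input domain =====

-- A=character-by-character index walk; B=split on `old` then join with `new` (simpler, library boundary-finding). Pre_: old ≠ "" (A never returns there).


-- ===== PORT A =====
-- A's while loop over index i, transliterated as recursion on the suffix text[i:];
-- the fuel argument (= length of the suffix at entry) only makes the recursion total:
-- when old ≠ "" each iteration consumes at least one character, so fuel never runs out.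
def ManualReplaceGo (old new : List Char) : Nat → List Char → List Char
  | _, [] => []
  | 0, _ :: _ => []                                     -- fuel exhausted: unreachable when old ≠ []
  | fuel + 1, c :: cs =>
      if (c :: cs).take old.length = old                -- text[i:i+len(old)] == old
      then new ++ ManualReplaceGo old new fuel ((c :: cs).drop old.length)   -- result += new; i += len(old)
      else c :: ManualReplaceGo old new fuel cs         -- result += text[i]; i += 1

def Manual_replace (text : String) (old : String) (new : String) : String :=
  String.ofList (ManualReplaceGo old.toList new.toList text.toList.length text.toList)

-- ===== PORT B =====
-- Source B: return new.join(text.split(old)); split raises ValueError on old = "" (none-branch, outside Pre_)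
def Manual_replace_alt (text : String) (old : String) (new : String) : String :=
  match PySem.Str.split? text old with
  | none => ""
  | some parts => PySem.Str.join new parts

-- ===== PRECONDITION & SPEC =====
-- Pre_ excludes old = "": there B's split raises ValueError while A loops forever on nonempty text (it returns only in the degenerate text = "" case).
def Pre_Manual_replace (_text : String) (old : String) (_new : String) : Prop := old ≠ ""
instance (text : String) (old : String) (new : String) : Decidable (Pre_Manual_replace text old new) := by unfold Pre_Manual_replace; infer_instance

def pvWitness_Manual_replace : String × String × String := ("abcabc", "b", "XY")

def Spec_Manual_replace (text : String) (old : String) (new : String) (out : String) : Prop := out = Manual_replace_alt text old new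
instance (text : String) (old : String) (new : String) (out : String) : Decidable (Spec_Manual_replace text old new out) := by unfold Spec_Manual_replace; infer_instance

-- ===== CLAIM (what is proved, stated in full; the proofs are below) =====
def Claim_equal_Manual_replace : Prop := ∀ (text : String) (old : String) (new : String), Dom_Manual_replace text old new → Pre_Manual_replace text old new → Spec_Manual_replace text old new (Manual_replace text old new)

-- ===== LEMMAS AND PROOFS =====

-- Full characterisation of splitOn's worker: its result is always a nonempty list, and the
-- cur/acc accumulators contribute exactly by prepending acc.reverse and extending the head with cur.reverse.
theorem splitOnGo_spec (sep : List Char) :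
    ∀ (fuel : Nat) (l cur acc : List Char) (accl : List (List Char)),
      ∃ h t, PySem.Chars.splitOn.go sep fuel l [] [] = h :: t ∧
        PySem.Chars.splitOn.go sep fuel l cur (acc :: accl) = (acc :: accl).reverse ++ (cur.reverse ++ h) :: t ∧
        PySem.Chars.splitOn.go sep fuel l cur [] = (cur.reverse ++ h) :: t := by
  intro fuel
  induction fuel with
  | zero =>
      intro l cur acc accl
      exact ⟨l, [], by simp [PySem.Chars.splitOn.go], by simp [PySem.Chars.splitOn.go], by simp [PySem.Chars.splitOn.go]⟩
  | succ f ih =>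
      intro l cur acc accl
      cases l with
      | nil =>
          exact ⟨[], [], by simp [PySem.Chars.splitOn.go], by simp [PySem.Chars.splitOn.go], by simp [PySem.Chars.splitOn.go]⟩
      | cons c cs =>
          by_cases hp : sep.isPrefixOf (c :: cs)
          · obtain ⟨h, t, h1, h2, h3⟩ := ih ((c :: cs).drop sep.length) [] [] []
            refine ⟨[], h :: t, ?_, ?_, ?_⟩
            · simp [PySem.Chars.splitOn.go, hp, h2]
            · simp [PySem.Chars.splitOn.go, hp]
              obtain ⟨h', t', h1', h2', _⟩ := ih ((c :: cs).drop sep.length) [] cur.reverse (acc :: accl)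
              rw [h1'] at h1; cases h1
              simpa using h2'
            · simp [PySem.Chars.splitOn.go, hp]
              obtain ⟨h', t', h1', h2', _⟩ := ih ((c :: cs).drop sep.length) [] cur.reverse []
              rw [h1'] at h1; cases h1
              simpa using h2'
          · obtain ⟨h, t, h1, _, h3⟩ := ih cs [c] acc accl
            refine ⟨c :: h, t, ?_, ?_, ?_⟩
            · simp [PySem.Chars.splitOn.go, hp, h3]
            · simp [PySem.Chars.splitOn.go, hp]
              obtain ⟨h', t', h1', h2', _⟩ := ih cs (c :: cur) acc accl
              rw [h1'] at h1; cases h1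
              simpa using h2'
            · simp [PySem.Chars.splitOn.go, hp]
              obtain ⟨h', t', h1', _, h3'⟩ := ih cs (c :: cur) acc accl
              rw [h1'] at h1; cases h1
              simpa using h3'

-- join pulls a head character out of the first segment
theorem join_cons_head (sep h : List Char) (c : Char) (t : List (List Char)) :
    PySem.Chars.join sep ((c :: h) :: t) = c :: PySem.Chars.join sep (h :: t) := by
  cases t with
  | nil => simp [PySem.Chars.join_singleton]
  | cons x t' => simp [PySem.Chars.join_cons_cons]

-- A's suffix walk equals join-of-split, for any sufficient fuels on both sides
theorem main_lemma (sep new : List Char) (hsep : sep ≠ []) :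
    ∀ (fuelA : Nat) (fuelB : Nat) (l : List Char), l.length ≤ fuelA → l.length ≤ fuelB →
      ManualReplaceGo sep new fuelA l = PySem.Chars.join new (PySem.Chars.splitOn.go sep fuelB l [] []) := by
  intro fuelA
  induction fuelA with
  | zero =>
      intro fuelB l hA hB
      have : l = [] := List.length_eq_zero_iff.mp (Nat.le_zero.mp hA)
      subst this
      cases fuelB <;> simp [ManualReplaceGo, PySem.Chars.splitOn.go, PySem.Chars.join_singleton]
  | succ f ih =>
      intro fuelB l hA hB
      cases l with
      | nil =>
          cases fuelB <;> simp [ManualReplaceGo, PySem.Chars.splitOn.go, PySem.Chars.join_singleton]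
      | cons c cs =>
          cases fuelB with
          | zero => simp at hB
          | succ g =>
              have hsl : 1 ≤ sep.length := by
                cases sep with
                | nil => exact absurd rfl hsep
                | cons a b => simp
              by_cases hp : (c :: cs).take sep.length = sep
              · have hpre : sep.isPrefixOf (c :: cs) = true := by
                  rw [List.isPrefixOf_iff_prefix, List.prefix_iff_eq_take]
                  exact hp.symm
                obtain ⟨h, t, h1, h2, _⟩ := splitOnGo_spec sep g ((c :: cs).drop sep.length) [] [] []
                have hdropA : ((c :: cs).drop sep.length).length ≤ f := by
                  simp only [List.length_drop, List.length_cons]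
                  simp only [List.length_cons] at hA
                  omega
                have hdropB : ((c :: cs).drop sep.length).length ≤ g := by
                  simp only [List.length_drop, List.length_cons]
                  simp only [List.length_cons] at hB
                  omega
                calc ManualReplaceGo sep new (f + 1) (c :: cs)
                    = new ++ ManualReplaceGo sep new f ((c :: cs).drop sep.length) := by
                      simp [ManualReplaceGo, hp]
                  _ = new ++ PySem.Chars.join new (PySem.Chars.splitOn.go sep g ((c :: cs).drop sep.length) [] []) := by
                      rw [ih g ((c :: cs).drop sep.length) hdropA hdropB]
                  _ = PySem.Chars.join new (PySem.Chars.splitOn.go sep (g + 1) (c :: cs) [] []) := by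
                      simp only [PySem.Chars.splitOn.go, hpre, if_true]
                      rw [show ((([] : List Char).reverse) :: ([] : List (List Char))) = [([] : List Char)] by rfl] at *
                      rw [h2, h1]
                      simp [PySem.Chars.join_cons_cons]
              · have hpre : sep.isPrefixOf (c :: cs) = false := by
                  rw [Bool.eq_false_iff]
                  intro hcon
                  rw [List.isPrefixOf_iff_prefix, List.prefix_iff_eq_take] at hcon
                  exact hp hcon.symm
                obtain ⟨h, t, h1, _, h3⟩ := splitOnGo_spec sep g cs [c] [] []
                have hcsA : cs.length ≤ f := by simp only [List.length_cons] at hA; omega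
                have hcsB : cs.length ≤ g := by simp only [List.length_cons] at hB; omega
                calc ManualReplaceGo sep new (f + 1) (c :: cs)
                    = c :: ManualReplaceGo sep new f cs := by simp [ManualReplaceGo, hp]
                  _ = c :: PySem.Chars.join new (PySem.Chars.splitOn.go sep g cs [] []) := by
                      rw [ih g cs hcsA hcsB]
                  _ = PySem.Chars.join new (PySem.Chars.splitOn.go sep (g + 1) (c :: cs) [] []) := by
                      simp only [PySem.Chars.splitOn.go, hpre, if_false, Bool.false_eq_true]
                      rw [h3, h1]
                      simp [join_cons_head]

-- ===== VERDICT (by name: the statement is the Claim_ definition above) =====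
theorem Manual_replace_spec : Claim_equal_Manual_replace := by
  intro text old new _ hpre
  show Manual_replace text old new = Manual_replace_alt text old new
  have hol : old.toList ≠ [] := by
    intro h
    exact hpre (String.toList_inj.mp (by simpa using h))
  have hemp : old.toList.isEmpty = false := by
    simpa [List.isEmpty_eq_false_iff] using hol
  have hjoin := main_lemma old.toList new.toList hol text.toList.length (text.toList.length + 1)
      text.toList le_rfl (Nat.le_succ _)
  simp only [Manual_replace, Manual_replace_alt, PySem.Str.split?, PySem.Chars.split?, hemp,
    Bool.false_eq_true, if_false, Option.map_some, PySem.Str.join]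
  rw [hjoin]
  congr 1
  simp only [PySem.Chars.splitOn, List.map_map]
  rw [show String.toList ∘ String.ofList = id from funext (fun _ => String.toList_ofList), List.map_id]
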